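-- pv_equiv track=rewrite | github.com/Informatics-ITS/ta-yoel | stego_functions.py | sort_revert
-- ===== SOURCE A (Python) =====
-- def sort_revert(listn, indices_list = None):
--     if indices_list is None:
--         indices_list = list(range(len(listn)))
--     sorted_indices = sorted(range(len(listn)), key=lambda i: listn[i])
--     return (
--         [listn[i] for i in sorted_indices],
--         [indices_list[i] for i in sorted_indices]
--     )
-- ===== SOURCE B (Python) =====
-- def sort_revert(listn, indices_list=None):
--     if indices_list is None:
--         indices_list = range(len(listn))
--     # Stable insertion sort: build the sorted pair list one element at a time,
--     # inserting each (value, companion) before the first strictly greater value.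
--     pairs = []
--     for v, j in zip(listn, indices_list):
--         k = 0
--         while k < len(pairs) and pairs[k][0] <= v:
--             k += 1
--         pairs.insert(k, (v, j))
--     return ([v for v, _ in pairs], [j for _, j in pairs])
-- ===== Notes on version B (the rewrite author's own statement) =====
-- stated objective: alternative
-- what changed: Replaces the builtin argsort (sorted index list plus two indexed gathers) by a hand-written stable insertion sort: one pass that inserts each (value, companion) pair into an accumulated sorted list before the first strictly greater value, then unzips; trades the O(n log n) builtin sort for a simple self-contained O(n^2) pass.
import Mathlib
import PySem

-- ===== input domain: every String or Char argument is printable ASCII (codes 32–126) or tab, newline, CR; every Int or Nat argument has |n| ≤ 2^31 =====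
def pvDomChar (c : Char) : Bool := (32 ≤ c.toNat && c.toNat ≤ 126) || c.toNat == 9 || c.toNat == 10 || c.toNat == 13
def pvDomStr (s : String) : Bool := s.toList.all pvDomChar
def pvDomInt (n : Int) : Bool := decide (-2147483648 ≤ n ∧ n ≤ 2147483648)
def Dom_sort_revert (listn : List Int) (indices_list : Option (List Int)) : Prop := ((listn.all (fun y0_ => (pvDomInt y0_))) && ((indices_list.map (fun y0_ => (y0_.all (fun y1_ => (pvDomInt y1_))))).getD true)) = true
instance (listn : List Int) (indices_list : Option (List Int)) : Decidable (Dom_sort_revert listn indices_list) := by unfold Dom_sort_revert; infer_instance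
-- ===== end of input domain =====

-- B replaces A's builtin argsort by a hand-written stable insertion sort over (value, companion) pairs; equivalence proved on Pre_ below.

-- ===== PORT A =====
def sort_revert (listn : List Int) (indices_list : Option (List Int)) : List Int × List Int :=
  let il : List Int := match indices_list with
    | none => PySem.List.pyRange 0 (listn.length : Int) 1
    | some l => l
  let sortedIndices := PySem.List.sorted (PySem.List.pyRange 0 (listn.length : Int) 1)
      (fun i => PySem.List.pyGetD listn i 0) false
  (sortedIndices.map (fun i => PySem.List.pyGetD listn i 0),
   sortedIndices.map (fun i => PySem.List.pyGetD il i 0))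

-- ===== PORT B =====
-- Source B's inner while-loop + list.insert: put p before the first pair whose value is strictly greater
def pvInsertPair (p : Int × Int) : List (Int × Int) → List (Int × Int)
  | [] => [p]
  | q :: qs => if q.1 ≤ p.1 then q :: pvInsertPair p qs else p :: q :: qs

def sort_revert_alt (listn : List Int) (indices_list : Option (List Int)) : List Int × List Int :=
  let il : List Int := match indices_list with
    | none => PySem.List.pyRange 0 (listn.length : Int) 1
    | some l => l
  let pairs := (listn.zip il).foldl (fun acc p => pvInsertPair p acc) []
  (pairs.map Prod.fst, pairs.map Prod.snd)

-- ===== PRECONDITION & SPEC =====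
-- Pre_ excludes a given indices_list shorter than listn, on which A raises IndexError.
def Pre_sort_revert (listn : List Int) (indices_list : Option (List Int)) : Prop :=
  indices_list.all (fun l => decide (listn.length ≤ l.length)) = true
instance (listn : List Int) (indices_list : Option (List Int)) : Decidable (Pre_sort_revert listn indices_list) := by unfold Pre_sort_revert; infer_instance
def pvWitness_sort_revert : List Int × Option (List Int) := ([3, 1, 2], some [10, 20, 30])

def Spec_sort_revert (listn : List Int) (indices_list : Option (List Int)) (out : List Int × List Int) : Prop := out = sort_revert_alt listn indices_list
instance (listn : List Int) (indices_list : Option (List Int)) (out : List Int × List Int) : Decidable (Spec_sort_revert listn indices_list out) := by unfold Spec_sort_revert; infer_instance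

-- ===== CLAIM (what is proved, stated in full; the proofs are below) =====
def Claim_equal_sort_revert : Prop := ∀ (listn : List Int) (indices_list : Option (List Int)), Dom_sort_revert listn indices_list → Pre_sort_revert listn indices_list → Spec_sort_revert listn indices_list (sort_revert listn indices_list)

-- ===== LEMMAS AND PROOFS =====

-- Source B's scan-and-insert is PySem's insertBy with the strict-less test
theorem pvInsertPair_eq_insertBy (p : Int × Int) :
    ∀ ys : List (Int × Int),
      pvInsertPair p ys = PySem.List.insertBy (fun a b => decide (a.1 < b.1)) p ys
  | [] => rfl
  | q :: qs => by
    simp only [pvInsertPair, PySem.List.insertBy]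
    by_cases h : q.1 ≤ p.1
    · simp [h, not_lt.mpr h, pvInsertPair_eq_insertBy p qs]
    · simp [h, not_le.mp h]

theorem foldl_pvInsertPair_eq_sorted (xs : List (Int × Int)) :
    xs.foldl (fun acc p => pvInsertPair p acc) []
      = PySem.List.sorted xs (fun p => p.1) false := by
  rw [PySem.List.sorted_eq_foldl_insertBy]
  have hf : (fun (acc : List (Int × Int)) p => pvInsertPair p acc)
      = (fun acc p => PySem.List.insertBy (fun a b => decide (a.1 < b.1)) p acc) := by
    funext acc p; exact pvInsertPair_eq_insertBy p acc
  rw [hf]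

theorem map_insertBy {α β : Type} (f : α → β) (bf : α → α → Bool) (bf' : β → β → Bool)
    (h : ∀ a b, bf' (f a) (f b) = bf a b) (x : α) :
    ∀ ys : List α, (PySem.List.insertBy bf x ys).map f = PySem.List.insertBy bf' (f x) (ys.map f)
  | [] => by simp [PySem.List.insertBy]
  | y :: ys => by
    simp only [PySem.List.insertBy, List.map_cons, h]
    by_cases hb : bf x y
    · simp [hb]
    · simp [hb, map_insertBy f bf bf' h x ys]

theorem map_foldl_insertBy {α β : Type} (f : α → β) (bf : α → α → Bool) (bf' : β → β → Bool)
    (h : ∀ a b, bf' (f a) (f b) = bf a b) :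
    ∀ (xs acc : List α),
      (xs.foldl (fun acc x => PySem.List.insertBy bf x acc) acc).map f
        = (xs.map f).foldl (fun acc y => PySem.List.insertBy bf' y acc) (acc.map f)
  | [], acc => rfl
  | x :: xs, acc => by
    simp only [List.foldl_cons, List.map_cons]
    rw [map_foldl_insertBy f bf bf' h xs, map_insertBy f bf bf' h]

-- stable sort commutes with map when the key factors through the map
theorem sorted_map_comm {α β : Type} (f : α → β) (key : α → Int) (key' : β → Int)
    (h : ∀ a, key' (f a) = key a) (xs : List α) :
    (PySem.List.sorted xs key false).map f = PySem.List.sorted (xs.map f) key' false := by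
  rw [PySem.List.sorted_eq_foldl_insertBy, PySem.List.sorted_eq_foldl_insertBy]
  exact map_foldl_insertBy f _ _ (fun a b => by simp [h]) xs []

theorem zip_eq_map_range (listn il : List Int) (h : listn.length ≤ il.length) :
    listn.zip il = (PySem.List.pyRange 0 (listn.length : Int) 1).map
      (fun i => (PySem.List.pyGetD listn i 0, PySem.List.pyGetD il i 0)) := by
  apply List.ext_getElem
  · simp [PySem.List.length_pyRange_one]; omega
  · intro k h1 h2
    have hk : k < listn.length := by
      simpa [PySem.List.length_pyRange_one] using h2
    have hk' : k < il.length := lt_of_lt_of_le hk h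
    simp [PySem.List.getElem_pyRange_one, PySem.List.pyGetD_natCast,
      List.getD_eq_getElem?_getD, hk, hk']

theorem core_eq (listn il : List Int) (h : listn.length ≤ il.length) :
    ((PySem.List.sorted (PySem.List.pyRange 0 (listn.length : Int) 1)
        (fun i => PySem.List.pyGetD listn i 0) false).map (fun i => PySem.List.pyGetD listn i 0),
     (PySem.List.sorted (PySem.List.pyRange 0 (listn.length : Int) 1)
        (fun i => PySem.List.pyGetD listn i 0) false).map (fun i => PySem.List.pyGetD il i 0))
    = (((listn.zip il).foldl (fun acc p => pvInsertPair p acc) []).map Prod.fst,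
       ((listn.zip il).foldl (fun acc p => pvInsertPair p acc) []).map Prod.snd) := by
  rw [foldl_pvInsertPair_eq_sorted]
  have hpairs :
      PySem.List.sorted (listn.zip il) (fun p => p.1) false
        = (PySem.List.sorted (PySem.List.pyRange 0 (listn.length : Int) 1)
            (fun i => PySem.List.pyGetD listn i 0) false).map
            (fun i => (PySem.List.pyGetD listn i 0, PySem.List.pyGetD il i 0)) := by
    rw [zip_eq_map_range listn il h,
      ← sorted_map_comm (fun i => (PySem.List.pyGetD listn i 0, PySem.List.pyGetD il i 0))
        (fun i => PySem.List.pyGetD listn i 0) (fun p => p.1) (fun a => rfl)]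
  rw [hpairs]
  simp [List.map_map, Function.comp]

-- ===== VERDICT (by name: the statement is the Claim_ definition above) =====
theorem sort_revert_spec : Claim_equal_sort_revert := by
  intro listn indices_list _ hpre
  unfold Spec_sort_revert sort_revert sort_revert_alt
  cases indices_list with
  | none =>
    exact core_eq listn _ (by simp [PySem.List.length_pyRange_one])
  | some l =>
    exact core_eq listn l (by simpa [Pre_sort_revert] using hpre)
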